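-- pv_equiv track=rewrite | github.com/jinzhongjia/decky-music | backend/providers/netease_batch.py | normalize_song_mids
-- ===== SOURCE A (Python) =====
-- def normalize_song_mids(
--     mids: list[str],
-- ) -> tuple[dict[str, str], list[int], list[str]]:
--     """标准化歌曲 MID，并保留批量请求需要的唯一 song_id。
--
--     Args:
--         mids: 原始歌曲 MID 列表。
--
--     Returns:
--         三元组：
--         - 输入 MID 到标准化 MID 的映射。
--         - 唯一 song_id 列表（按首次出现顺序）。
--         - 无法解析的 MID 列表。
--     """
--     normalized_by_mid: dict[str, str] = {}
--     request_ids: list[int] = []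
--     invalid_mids: list[str] = []
--     seen_ids: set[int] = set()
--
--     for mid in mids:
--         try:
--             song_id = int(mid)
--         except (TypeError, ValueError):
--             invalid_mids.append(mid)
--             continue
--
--         normalized_mid = str(song_id)
--         normalized_by_mid[mid] = normalized_mid
--
--         if song_id in seen_ids:
--             continue
--         seen_ids.add(song_id)
--         request_ids.append(song_id)
--
--     return normalized_by_mid, request_ids, invalid_mids
-- ===== SOURCE B (Python) =====
-- def normalize_song_mids(
--     mids: list[str],
-- ) -> tuple[dict[str, str], list[int], list[str]]:
--     """Sort-based dedup: record every valid occurrence with its position, compute each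
--     song_id's first position by overwriting a dict while walking the occurrences in
--     reverse, then recover the first-occurrence order by sorting on that position —
--     no seen-set is consulted while iterating."""
--     normalized_by_mid: dict[str, str] = {}
--     invalid_mids: list[str] = []
--     occurrences: list[tuple[int, int]] = []  # (position, song_id) for every valid mid
--     for i, mid in enumerate(mids):
--         try:
--             song_id = int(mid)
--         except (TypeError, ValueError):
--             invalid_mids.append(mid)
--             continue
--         normalized_by_mid[mid] = str(song_id)
--         occurrences.append((i, song_id))
--     first_pos: dict[int, int] = {}
--     for i, song_id in reversed(occurrences):
--         first_pos[song_id] = i  # later writes win: smallest position remains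
--     request_ids = [sid for sid, _ in sorted(first_pos.items(), key=lambda kv: kv[1])]
--     return normalized_by_mid, request_ids, invalid_mids
-- ===== Notes on version B (the rewrite author's own statement) =====
-- stated objective: alternative
-- what changed: A dedups song ids inline with a seen-set inside the main loop; B instead records every valid (position, song_id) occurrence, computes each id's first position by overwriting a dict while walking the occurrences in reverse, and recovers first-occurrence order by sorting those (id, position) pairs on position.
import Mathlib
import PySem

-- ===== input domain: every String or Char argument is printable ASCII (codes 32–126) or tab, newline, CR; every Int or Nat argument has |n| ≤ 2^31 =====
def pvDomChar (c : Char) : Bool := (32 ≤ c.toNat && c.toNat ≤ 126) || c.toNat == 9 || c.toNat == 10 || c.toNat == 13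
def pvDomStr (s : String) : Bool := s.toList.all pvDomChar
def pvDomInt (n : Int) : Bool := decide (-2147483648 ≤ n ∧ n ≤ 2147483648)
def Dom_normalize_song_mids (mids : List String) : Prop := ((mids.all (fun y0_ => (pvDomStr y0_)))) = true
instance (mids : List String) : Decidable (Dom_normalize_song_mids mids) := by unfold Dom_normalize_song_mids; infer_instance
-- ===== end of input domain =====

-- B replaces A's inline seen-set dedup by a sort-based one: it records every valid
-- (position, song_id) occurrence, computes each id's first position by overwriting a
-- dict over the occurrences in reverse, and sorts the (id, position) pairs by position
-- to recover first-occurrence order; objective: alternative algorithm, similar cost.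

-- ===== PORT A =====
-- A's loop state: (normalized_by_mid, request_ids, invalid_mids, seen_ids)
def pvStepA (st : PySem.Dict String String × List Int × List String × PySem.Set Int)
    (mid : String) : PySem.Dict String String × List Int × List String × PySem.Set Int :=
  match PySem.Int.ofStr? mid with
  | none => (st.1, st.2.1, st.2.2.1 ++ [mid], st.2.2.2)
  | some song_id =>
    let normalized_mid := PySem.Int.toStr song_id
    let d := st.1.insert mid normalized_mid
    if PySem.Set.contains st.2.2.2 song_id then (d, st.2.1, st.2.2.1, st.2.2.2)
    else (d, st.2.1 ++ [song_id], st.2.2.1, PySem.Set.add st.2.2.2 song_id)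

def normalize_song_mids (mids : List String) : (List (String × String)) × List Int × List String :=
  let st := mids.foldl pvStepA (PySem.Dict.empty, [], [], PySem.Set.empty)
  (st.1.items, st.2.1, st.2.2.1)

-- ===== PORT B =====
-- B's first loop state: (normalized_by_mid, occurrences, invalid_mids); p = (i, mid)
def pvStepB (st : PySem.Dict String String × List (Int × Int) × List String)
    (p : Int × String) : PySem.Dict String String × List (Int × Int) × List String :=
  match PySem.Int.ofStr? p.2 with
  | none => (st.1, st.2.1, st.2.2 ++ [p.2])
  | some song_id =>
    (st.1.insert p.2 (PySem.Int.toStr song_id), st.2.1 ++ [(p.1, song_id)], st.2.2)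

-- second loop: 'for i, song_id in reversed(occurrences): first_pos[song_id] = i'
def pvFirstPos (occ : List (Int × Int)) : PySem.Dict Int Int :=
  occ.reverse.foldl (fun d (q : Int × Int) => d.insert q.2 q.1) PySem.Dict.empty

def normalize_song_mids_alt (mids : List String) : (List (String × String)) × List Int × List String :=
  let st := (PySem.List.enumerate mids 0).foldl pvStepB (PySem.Dict.empty, [], [])
  let fp := pvFirstPos st.2.1
  (st.1.items,
   (PySem.List.sorted fp.items (fun kv => kv.2) false).map (fun kv => kv.1),
   st.2.2)

-- ===== PRECONDITION & SPEC =====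
def Spec_normalize_song_mids (mids : List String) (out : (List (String × String)) × List Int × List String) : Prop := out = normalize_song_mids_alt mids
instance (mids : List String) (out : (List (String × String)) × List Int × List String) : Decidable (Spec_normalize_song_mids mids out) := by unfold Spec_normalize_song_mids; infer_instance

-- ===== CLAIM (what is proved, stated in full; the proofs are below) =====
def Claim_equal_normalize_song_mids : Prop := ∀ (mids : List String), Dom_normalize_song_mids mids → Spec_normalize_song_mids mids (normalize_song_mids mids)

-- ===== LEMMAS AND PROOFS =====

-- first index at which sid occurs in occ (0 if absent; only used where it occurs)
def pvFi (occ : List (Int × Int)) (sid : Int) : Int :=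
  ((occ.find? (fun q => q.2 == sid)).map (fun q => q.1)).getD 0

lemma pvFirstPos_cons (x : Int × Int) (occ : List (Int × Int)) :
    pvFirstPos (x :: occ) = (pvFirstPos occ).insert x.2 x.1 := by
  simp [pvFirstPos, List.foldl_append]

lemma pv_get?_firstPos (occ : List (Int × Int)) (sid : Int) :
    (pvFirstPos occ).get? sid = (occ.find? (fun q => q.2 == sid)).map (fun q => q.1) := by
  induction occ with
  | nil => rfl
  | cons x occ ih =>
    rw [pvFirstPos_cons, PySem.Dict.get?_insert]
    by_cases h : sid = x.2
    · simp [List.find?, h]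
    · have : (x.2 == sid) = false := by simp [Ne.symm h]
      simp [List.find?, this, h, ih]

lemma pv_keys_firstPos (occ : List (Int × Int)) :
    (pvFirstPos occ).keys = PySem.Set.ofList (occ.reverse.map (fun q => q.2)) := by
  have h := PySem.Dict.keys_foldl_insert_key (occ.reverse) (fun q : Int × Int => q.2)
      (fun _ q => q.1) PySem.Dict.empty
  simpa [pvFirstPos, PySem.Set.update_nil_left] using h

lemma pv_nodup_keys_firstPos (occ : List (Int × Int)) : (pvFirstPos occ).keys.Nodup := by
  exact PySem.Dict.nodup_keys_foldl_insert_key (occ.reverse) (fun q : Int × Int => q.2)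
      (fun _ q => q.1) PySem.Dict.empty (by simp)

lemma pv_ofList_cons {α : Type} [BEq α] [LawfulBEq α] (a : α) (l : List α) :
    PySem.Set.ofList (a :: l) = a :: (PySem.Set.ofList l).filter (fun y => y != a) := by
  have h1 : PySem.Set.ofList (a :: l) = PySem.Set.update [a] l := by
    simp [PySem.Set.ofList, PySem.Set.add, PySem.Set.update]
  rw [h1, PySem.Set.update_eq_append_filter]
  simp [PySem.Set.contains, bne]

-- the crux: along first-occurrence order, first positions strictly increase
lemma pv_fi_pairwise (occ : List (Int × Int))
    (hp : (occ.map (fun q => q.1)).Pairwise (· < ·)) :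
    (PySem.Set.ofList (occ.map (fun q => q.2))).Pairwise
      (fun a b => pvFi occ a < pvFi occ b) := by
  induction occ with
  | nil => simp [PySem.Set.ofList]
  | cons x occ ih =>
    simp only [List.map_cons, List.pairwise_cons] at hp
    obtain ⟨h1, h2⟩ := hp
    rw [List.map_cons, pv_ofList_cons]
    constructor
    · intro b hb
      rw [List.mem_filter] at hb
      obtain ⟨hbmem, hbne⟩ := hb
      have hbne' : b ≠ x.2 := by simpa using hbne
      have hbocc : b ∈ occ.map (fun q => q.2) := (PySem.Set.mem_ofList _ _).mp hbmem
      obtain ⟨q, hq, hqb⟩ := List.mem_map.mp hbocc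
      -- find? succeeds on occ for b
      have hfind : ∃ r, occ.find? (fun q => q.2 == b) = some r := by
        have : (occ.find? (fun q => q.2 == b)).isSome := by
          rw [List.find?_isSome]; exact ⟨q, hq, by simp [hqb]⟩
        exact Option.isSome_iff_exists.mp this
      obtain ⟨r, hr⟩ := hfind
      have hrmem : r ∈ occ := List.mem_of_find?_eq_some hr
      have hfix : pvFi (x :: occ) x.2 = x.1 := by simp [pvFi, List.find?]
      have hxb : (x.2 == b) = false := by simp [Ne.symm hbne']
      have hfib : pvFi (x :: occ) b = r.1 := by simp [pvFi, List.find?, hxb, hr]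
      rw [hfix, hfib]
      exact h1 r.1 (List.mem_map.mpr ⟨r, hrmem, rfl⟩)
    · have ihp := ih h2
      have hsub : ((PySem.Set.ofList (occ.map (fun q => q.2))).filter (fun y => y != x.2)).Sublist
          (PySem.Set.ofList (occ.map (fun q => q.2))) := List.filter_sublist
      refine (List.Pairwise.sublist hsub ihp).imp_of_mem ?_
      intro a b ha hb hab
      have hane : a ≠ x.2 := by simpa using (List.mem_filter.mp ha).2
      have hbne : b ≠ x.2 := by simpa using (List.mem_filter.mp hb).2
      have hfa : pvFi (x :: occ) a = pvFi occ a := by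
        simp [pvFi, List.find?, show (x.2 == a) = false by simp [Ne.symm hane]]
      have hfb : pvFi (x :: occ) b = pvFi occ b := by
        simp [pvFi, List.find?, show (x.2 == b) = false by simp [Ne.symm hbne]]
      rw [hfa, hfb]; exact hab

lemma pv_items_firstPos (occ : List (Int × Int)) :
    (pvFirstPos occ).items
      = (PySem.Set.ofList (occ.reverse.map (fun q => q.2))).map
          (fun k => (k, pvFi occ k)) := by
  rw [PySem.Dict.items_eq_map_keys (pvFirstPos occ) (pv_nodup_keys_firstPos occ) 0,
      pv_keys_firstPos]
  apply List.map_congr_left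
  intro k hk
  have hk' : k ∈ occ.map (fun q => q.2) := by
    have := (PySem.Set.mem_ofList _ _).mp hk
    simpa [List.map_reverse] using this
  have hfind : ∃ r, occ.find? (fun q => q.2 == k) = some r := by
    obtain ⟨q, hq, hqk⟩ := List.mem_map.mp hk'
    have : (occ.find? (fun q => q.2 == k)).isSome := by
      rw [List.find?_isSome]; exact ⟨q, hq, by simp [hqk]⟩
    exact Option.isSome_iff_exists.mp this
  obtain ⟨r, hr⟩ := hfind
  have : (pvFirstPos occ).getD k 0 = pvFi occ k := by
    rw [PySem.Dict.getD_eq_get?_getD, pv_get?_firstPos, hr]; simp [pvFi, hr]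
  rw [this]

-- sorting the first-position pairs by position recovers first-occurrence order
lemma pv_sorted_firstPos (occ : List (Int × Int))
    (hp : (occ.map (fun q => q.1)).Pairwise (· < ·)) :
    (PySem.List.sorted (pvFirstPos occ).items (fun kv => kv.2) false).map (fun kv => kv.1)
      = PySem.Set.ofList (occ.map (fun q => q.2)) := by
  have hperm : ((PySem.Set.ofList (occ.map (fun q => q.2))).map
      (fun k => (k, pvFi occ k))).Perm (pvFirstPos occ).items := by
    rw [pv_items_firstPos]
    apply List.Perm.map
    apply (List.perm_ext_iff_of_nodup (PySem.Set.nodup_ofList _) (PySem.Set.nodup_ofList _)).mpr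
    intro a
    simp [PySem.Set.mem_ofList, List.map_reverse]
  have hpw : ((PySem.Set.ofList (occ.map (fun q => q.2))).map
      (fun k => (k, pvFi occ k))).Pairwise (fun a b => a.2 < b.2) := by
    rw [List.pairwise_map]
    exact pv_fi_pairwise occ hp
  rw [PySem.List.sorted_eq_of_perm_of_pairwise_lt _ _ _ hperm hpw]
  rw [List.map_map]
  have hid : ((fun kv : Int × Int => kv.1) ∘ fun k => (k, pvFi occ k)) = id := rfl
  rw [hid, List.map_id]

-- the occurrence positions produced by B's first loop strictly increase
lemma pv_occ_increasing (mids : List String) : ∀ (s : Int)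
    (d : PySem.Dict String String) (occ : List (Int × Int)) (inv : List String),
    (∀ q ∈ occ, q.1 < s) → (occ.map (fun q => q.1)).Pairwise (· < ·) →
    ((((PySem.List.enumerate mids s).foldl pvStepB (d, occ, inv)).2.1.map
        (fun q => q.1)).Pairwise (· < ·)
     ∧ ∀ q ∈ ((PySem.List.enumerate mids s).foldl pvStepB (d, occ, inv)).2.1,
         q.1 < s + mids.length) := by
  induction mids with
  | nil => intro s d occ inv hb hp; exact ⟨hp, by simpa using hb⟩
  | cons m rest ih =>
    intro s d occ inv hb hp
    rw [PySem.List.enumerate_cons, List.foldl_cons]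
    cases h : PySem.Int.ofStr? m with
    | none =>
      simp only [pvStepB, h]
      have := ih (s + 1) d occ (inv ++ [m]) (fun q hq => by have := hb q hq; omega) hp
      refine ⟨this.1, fun q hq => ?_⟩
      have := this.2 q hq; simp only [List.length_cons]; push_cast; omega
    | some sid =>
      simp only [pvStepB, h]
      have hb' : ∀ q ∈ occ ++ [(s, sid)], q.1 < s + 1 := by
        intro q hq
        rcases List.mem_append.mp hq with h1 | h1
        · have := hb q h1; omega
        · simp at h1; subst h1; omega
      have hp' : ((occ ++ [(s, sid)]).map (fun q => q.1)).Pairwise (· < ·) := by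
        rw [List.map_append, List.pairwise_append]
        refine ⟨hp, by simp, ?_⟩
        intro a ha b hbm
        simp only [List.map_cons, List.map_nil, List.mem_singleton] at hbm
        subst hbm
        obtain ⟨q, hq, rfl⟩ := List.mem_map.mp ha
        exact hb q hq
      have := ih (s + 1) (d.insert m (PySem.Int.toStr sid)) (occ ++ [(s, sid)]) inv hb' hp'
      refine ⟨this.1, fun q hq => ?_⟩
      have := this.2 q hq; simp only [List.length_cons]; push_cast; omega

-- A's loop is simulated by B's first loop: request_ids = seen_ids = set of sids so far
lemma pv_loop_sim (mids : List String) : ∀ (s : Int)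
    (d : PySem.Dict String String) (occ : List (Int × Int)) (inv : List String),
    mids.foldl pvStepA
      (d, PySem.Set.ofList (occ.map (fun q => q.2)), inv,
       PySem.Set.ofList (occ.map (fun q => q.2)))
    = ((((PySem.List.enumerate mids s).foldl pvStepB (d, occ, inv)).1,
        PySem.Set.ofList ((((PySem.List.enumerate mids s).foldl pvStepB (d, occ, inv)).2.1).map (fun q => q.2)),
        (((PySem.List.enumerate mids s).foldl pvStepB (d, occ, inv)).2.2),
        PySem.Set.ofList ((((PySem.List.enumerate mids s).foldl pvStepB (d, occ, inv)).2.1).map (fun q => q.2)))) := by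
  induction mids with
  | nil => intro s d occ inv; rfl
  | cons mid rest ih =>
    intro s d occ inv
    rw [PySem.List.enumerate_cons, List.foldl_cons, List.foldl_cons]
    cases h : PySem.Int.ofStr? mid with
    | none =>
      simp only [pvStepA, pvStepB, h]
      exact ih (s + 1) d occ (inv ++ [mid])
    | some sid =>
      simp only [pvStepA, pvStepB, h]
      by_cases hm : sid ∈ occ.map (fun q => q.2)
      · have hc : PySem.Set.contains (PySem.Set.ofList (occ.map (fun q => q.2))) sid = true :=
          (PySem.Set.contains_iff _ _).mpr ((PySem.Set.mem_ofList _ _).mpr hm)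
        have hset : PySem.Set.ofList ((occ ++ [(s, sid)]).map (fun q => q.2))
            = PySem.Set.ofList (occ.map (fun q => q.2)) := by
          rw [List.map_append]
          simp only [List.map_cons, List.map_nil, PySem.Set.ofList_append_singleton]
          exact PySem.Set.add_of_mem ((PySem.Set.mem_ofList _ _).mpr hm)
        rw [hc]
        simp only [if_true]
        have hih := ih (s + 1) (d.insert mid (PySem.Int.toStr sid)) (occ ++ [(s, sid)]) inv
        rw [hset] at hih
        exact hih
      · have hnm : sid ∉ PySem.Set.ofList (occ.map (fun q => q.2)) :=
          fun hx => hm ((PySem.Set.mem_ofList _ _).mp hx)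
        have hc : PySem.Set.contains (PySem.Set.ofList (occ.map (fun q => q.2))) sid = false := by
          rw [Bool.eq_false_iff]
          intro hcon
          exact hnm ((PySem.Set.contains_iff _ _).mp hcon)
        have hset : PySem.Set.ofList ((occ ++ [(s, sid)]).map (fun q => q.2))
            = PySem.Set.ofList (occ.map (fun q => q.2)) ++ [sid] := by
          rw [List.map_append]
          simp only [List.map_cons, List.map_nil, PySem.Set.ofList_append_singleton]
          exact PySem.Set.add_of_not_mem hnm
        rw [hc]
        simp only [if_false, Bool.false_eq_true]
        have hadd : PySem.Set.add (PySem.Set.ofList (occ.map (fun q => q.2))) sid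
            = PySem.Set.ofList (occ.map (fun q => q.2)) ++ [sid] := PySem.Set.add_of_not_mem hnm
        rw [hadd]
        have hih := ih (s + 1) (d.insert mid (PySem.Int.toStr sid)) (occ ++ [(s, sid)]) inv
        rw [hset] at hih
        exact hih

-- ===== VERDICT (by name: the statement is the Claim_ definition above) =====
theorem normalize_song_mids_spec : Claim_equal_normalize_song_mids := by
  unfold Claim_equal_normalize_song_mids
  intro mids _
  unfold Spec_normalize_song_mids normalize_song_mids normalize_song_mids_alt
  have hsim := pv_loop_sim mids 0 PySem.Dict.empty [] []
  have hinc := pv_occ_increasing mids 0 PySem.Dict.empty [] [] (by simp) (by simp)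
  have hsort := pv_sorted_firstPos
      (((PySem.List.enumerate mids 0).foldl pvStepB (PySem.Dict.empty, [], [])).2.1) hinc.1
  have e : (PySem.Set.ofList (([] : List (Int × Int)).map (fun q => q.2))) = ([] : List Int) := rfl
  rw [e] at hsim
  rw [show (PySem.Set.empty : PySem.Set Int) = ([] : List Int) from rfl]
  simp only [hsim, hsort]
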